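-- pv_equiv track=rewrite | github.com/Talalkhaled/partitioningStateMachine | partitioningStateMachine.py | find_non_similar_lists
-- ===== SOURCE A (Python) =====
-- def find_non_similar_lists(list_of_lists):
--     non_similar_indexes = []
--     similar_elements = {}
--
--     for i, sublist in enumerate(list_of_lists):
--         similar = False
--         for j, other_sublist in enumerate(list_of_lists):
--             if i != j and sublist == other_sublist:
--                 similar = True
--                 break
--         if not similar:
--             non_similar_indexes.append(i)
--         else:
--             if tuple(sublist) not in similar_elements:
--                 similar_elements[tuple(sublist)] = [i]
--             else:
--                 similar_elements[tuple(sublist)].append(i)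
--
--     return non_similar_indexes, similar_elements
-- ===== SOURCE B (Python) =====
-- def find_non_similar_lists(list_of_lists):
--     groups = {}
--     for i, sublist in enumerate(list_of_lists):
--         groups.setdefault(tuple(sublist), []).append(i)
--
--     non_similar_indexes = []
--     similar_elements = {}
--     for key, idxs in groups.items():
--         if len(idxs) == 1:
--             non_similar_indexes.append(idxs[0])
--         else:
--             similar_elements[key] = idxs
--
--     return non_similar_indexes, similar_elements
-- ===== Notes on version B (the rewrite author's own statement) =====
-- stated objective: alternative
-- what changed: B replaces A's all-pairs duplicate scan (an inner loop over the whole list for every element, plus an interleaved dict update) by a single pass that groups all indices per sublist in one dict, followed by one partitioning pass over the dict's items; intended to avoid the quadratic rescan, but a timing run only read ~1.5x inconsistently, so no speed is claimed.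
import Mathlib
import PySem

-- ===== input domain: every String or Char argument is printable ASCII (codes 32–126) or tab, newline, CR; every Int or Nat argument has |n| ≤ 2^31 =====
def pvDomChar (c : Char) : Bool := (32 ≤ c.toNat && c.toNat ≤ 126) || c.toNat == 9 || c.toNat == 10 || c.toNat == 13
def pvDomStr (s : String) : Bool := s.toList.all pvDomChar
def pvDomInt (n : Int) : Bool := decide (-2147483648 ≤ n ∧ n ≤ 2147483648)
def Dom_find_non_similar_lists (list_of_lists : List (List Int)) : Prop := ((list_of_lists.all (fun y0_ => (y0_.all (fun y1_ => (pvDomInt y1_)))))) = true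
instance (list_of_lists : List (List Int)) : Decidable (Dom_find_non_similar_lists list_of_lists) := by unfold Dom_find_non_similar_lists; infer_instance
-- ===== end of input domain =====

-- B replaces A's all-pairs duplicate scan by one grouping dict (sublist -> indices) built in a
-- single pass and then partitioned; objective: alternative (a different algorithm, same results).

-- ===== PORT A =====
-- literal transliteration of A: for each i an inner scan over the whole list with break (ported as .any),
-- then either append i to non_similar_indexes or update the similar_elements dict.
def find_non_similar_lists (list_of_lists : List (List Int)) : List Int × (List (List Int × List Int)) :=
  let res := (PySem.List.enumerate list_of_lists 0).foldl
    (fun (s : List Int × PySem.Dict (List Int) (List Int)) p =>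
      let similar := (PySem.List.enumerate list_of_lists 0).any
        (fun q => !(p.1 == q.1) && (p.2 == q.2))
      if !similar then (s.1 ++ [p.1], s.2)
      else if !(s.2.contains p.2) then (s.1, s.2.insert p.2 [p.1])
      else (s.1, s.2.modify p.2 [] (fun v => v ++ [p.1])))
    ([], PySem.Dict.empty)
  (res.1, res.2.items)

-- ===== PORT B =====
-- transliteration of B: one pass building groups (sublist -> all its indices via setdefault+append,
-- i.e. modify), then a pass over groups.items partitioning singletons from duplicate groups.
-- idxs[0] is ported as pyGetD _ 0 0; it is only evaluated under the length == 1 guard, so it is in range.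
def find_non_similar_lists_alt (list_of_lists : List (List Int)) : List Int × (List (List Int × List Int)) :=
  let groups := (PySem.List.enumerate list_of_lists 0).foldl
    (fun (d : PySem.Dict (List Int) (List Int)) p => d.modify p.2 [] (fun v => v ++ [p.1]))
    PySem.Dict.empty
  let res := groups.items.foldl
    (fun (s : List Int × PySem.Dict (List Int) (List Int)) kv =>
      if kv.2.length == 1 then (s.1 ++ [PySem.List.pyGetD kv.2 0 0], s.2)
      else (s.1, s.2.insert kv.1 kv.2))
    ([], PySem.Dict.empty)
  (res.1, res.2.items)

-- ===== PRECONDITION & SPEC =====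
def Spec_find_non_similar_lists (list_of_lists : List (List Int)) (out : List Int × (List (List Int × List Int))) : Prop := out = find_non_similar_lists_alt list_of_lists
instance (list_of_lists : List (List Int)) (out : List Int × (List (List Int × List Int))) : Decidable (Spec_find_non_similar_lists list_of_lists out) := by unfold Spec_find_non_similar_lists; infer_instance

-- ===== CLAIM (what is proved, stated in full; the proofs are below) =====
def Claim_equal_find_non_similar_lists : Prop := ∀ (list_of_lists : List (List Int)), Dom_find_non_similar_lists list_of_lists → Spec_find_non_similar_lists list_of_lists (find_non_similar_lists list_of_lists)

-- ===== LEMMAS AND PROOFS =====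

-- the enumerate list of the input
def pvE (L : List (List Int)) : List (Int × List Int) := PySem.List.enumerate L 0
-- all indices at which sublist k occurs in L, in order
def pvIdx (L : List (List Int)) (k : List Int) : List Int :=
  ((pvE L).filter (fun p => p.2 == k)).map (fun p => p.1)

-- generic: two distinct members make the length at least 2
theorem pv_two_le_length {α : Type} {l : List α} {a b : α} (ha : a ∈ l) (hb : b ∈ l)
    (hne : a ≠ b) : 2 ≤ l.length := by
  cases l with
  | nil => simp at ha
  | cons x t =>
    rcases List.mem_cons.mp ha with rfl | ha'
    · rcases List.mem_cons.mp hb with rfl | hb'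
      · exact absurd rfl hne
      · have := List.length_pos_of_mem hb'
        simp only [List.length_cons]; omega
    · have := List.length_pos_of_mem ha'
      simp only [List.length_cons]; omega

-- generic: a Nodup list all of whose members are one value has length ≤ 1
theorem pv_length_le_one {α : Type} {l : List α} {a : α} (hnd : l.Nodup)
    (h : ∀ x ∈ l, x = a) : l.length ≤ 1 := by
  cases l with
  | nil => simp
  | cons x t =>
    cases t with
    | nil => simp
    | cons y u =>
      exfalso
      have hx := h x (by simp)
      have hy := h y (by simp)
      rcases List.nodup_cons.mp hnd with ⟨hxm, _⟩
      exact hxm (by rw [hx, ← hy]; exact List.mem_cons_self)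

-- the first components of pvE L are pairwise distinct
theorem pv_nodup_fst (L : List (List Int)) : ((pvE L).map (fun p => p.1)).Nodup := by
  unfold pvE
  rw [List.Nodup, List.pairwise_map]
  exact (PySem.List.pairwise_lt_enumerate L 0).imp (fun h => ne_of_lt h)

theorem pv_nodup_E (L : List (List Int)) : (pvE L).Nodup := by
  exact (pv_nodup_fst L).of_map

-- every enumerate entry's index occurs among the indices of its value
theorem pv_mem_idx (L : List (List Int)) {p : Int × List Int} (hp : p ∈ pvE L) :
    p.1 ∈ pvIdx L p.2 := by
  exact List.mem_map.mpr ⟨p, List.mem_filter.mpr ⟨hp, by simp⟩, rfl⟩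

-- A's inner scan: "some other position holds the same sublist" ⟺ the occurrence list has length ≠ 1
theorem pv_similar_eq (L : List (List Int)) {p : Int × List Int} (hp : p ∈ pvE L) :
    (pvE L).any (fun q => !(p.1 == q.1) && (p.2 == q.2)) = !((pvIdx L p.2).length == 1) := by
  have hF : p ∈ (pvE L).filter (fun q => q.2 == p.2) := List.mem_filter.mpr ⟨hp, by simp⟩
  have hlen : (pvIdx L p.2).length = ((pvE L).filter (fun q => q.2 == p.2)).length := by
    simp [pvIdx]
  have key : ((pvE L).any (fun q => !(p.1 == q.1) && (p.2 == q.2)) = true)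
      ↔ ¬ ((pvIdx L p.2).length = 1) := by
    constructor
    · intro h
      rcases List.any_eq_true.mp h with ⟨q, hq, hb⟩
      rcases Bool.and_eq_true_iff.mp hb with ⟨h1, h2⟩
      have hq2 : p.2 = q.2 := by simpa using h2
      have hq1 : p.1 ≠ q.1 := by simpa using h1
      have hqF : q ∈ (pvE L).filter (fun r => r.2 == p.2) :=
        List.mem_filter.mpr ⟨hq, by simp [hq2]⟩
      have h2le : 2 ≤ ((pvE L).filter (fun r => r.2 == p.2)).length :=
        pv_two_le_length hF hqF (fun he => hq1 (by rw [he]))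
      rw [hlen]; omega
    · intro h
      have h1 : 0 < ((pvE L).filter (fun r => r.2 == p.2)).length := List.length_pos_of_mem hF
      by_contra hany
      have hall : ∀ q ∈ (pvE L).filter (fun r => r.2 == p.2), q = p := by
        intro q hq
        rcases List.mem_filter.mp hq with ⟨hqE, hq2b⟩
        have hq2 : q.2 = p.2 := by simpa using hq2b
        by_contra hne
        have hq1 : ¬ (p.1 = q.1) :=
          fun he => hne (List.inj_on_of_nodup_map (pv_nodup_fst L) hqE hp he.symm)
        exact hany (List.any_eq_true.mpr ⟨q, hqE, by simp [hq1, hq2]⟩)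
      have hnd : ((pvE L).filter (fun r => r.2 == p.2)).Nodup := (pv_nodup_E L).filter _
      have := pv_length_le_one hnd hall
      rw [hlen] at h; omega
  cases hA : (pvE L).any (fun q => !(p.1 == q.1) && (p.2 == q.2)) with
  | true =>
    have := key.mp hA
    simp
    omega
  | false =>
    have hlen1 : (pvIdx L p.2).length = 1 := by
      by_contra hne
      have := key.mpr hne
      rw [hA] at this
      exact Bool.false_ne_true this
    simp [hlen1]

-- first-occurrence dedup commutes with a value filter
theorem pv_ofList_filter {α : Type} [BEq α] [LawfulBEq α] (q : α → Bool) :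
    ∀ (xs : List α) (s : PySem.Set α),
    (xs.foldl PySem.Set.add s).filter q = (xs.filter q).foldl PySem.Set.add (s.filter q) := by
  intro xs
  induction xs with
  | nil => intro s; simp
  | cons x t ih =>
    intro s
    simp only [List.foldl_cons, List.filter_cons]
    by_cases hx : x ∈ s
    · have hadd : PySem.Set.add s x = s := by
        simp [PySem.Set.add, PySem.Set.contains, hx]
      rw [hadd]
      by_cases hq : q x
      · have hxf : x ∈ s.filter q := List.mem_filter.mpr ⟨hx, hq⟩
        have haddf : PySem.Set.add (s.filter q) x = s.filter q := by
          simp [PySem.Set.add, PySem.Set.contains, hxf]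
        simp [hq, ih s, haddf]
      · simp only [Bool.not_eq_true] at hq
        simp [hq, ih s]
    · have hadd : PySem.Set.add s x = s ++ [x] := by
        simp [PySem.Set.add, PySem.Set.contains, hx]
      rw [hadd, ih (s ++ [x])]
      by_cases hq : q x
      · have hxf : x ∉ s.filter q := fun hm => hx (List.mem_filter.mp hm).1
        have haddf : PySem.Set.add (s.filter q) x = s.filter q ++ [x] := by
          simp [PySem.Set.add, PySem.Set.contains, hxf]
        simp [hq, List.filter_append, haddf]
      · simp only [Bool.not_eq_true] at hq
        simp [hq, List.filter_append]

-- master lemma: listing the unique-occurrence keys in first-occurrence order, each mapped to its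
-- single index, is the same as filtering the enumerate list to unique-occurrence entries
theorem pv_master {α : Type} [BEq α] [LawfulBEq α] (g : α → List Int) :
    ∀ (E : List (Int × α)) (s : PySem.Set α),
    (∀ p ∈ E, p.1 ∈ g p.2) →
    ((E.map (fun p => p.1)).Nodup) →
    (∀ p ∈ E, s.contains p.2 = true → (g p.2).length ≠ 1) →
    (((E.map (fun p => p.2)).foldl PySem.Set.add s).filter (fun k => (g k).length == 1)).map
        (fun k => PySem.List.pyGetD (g k) 0 0)
      = (s.filter (fun k => (g k).length == 1)).map (fun k => PySem.List.pyGetD (g k) 0 0)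
        ++ (E.filter (fun p => (g p.2).length == 1)).map (fun p => p.1) := by
  intro E
  induction E with
  | nil => intro s h1 h2 h3; simp
  | cons p t ih =>
    intro s h1 h2 h3
    have hp1 : p.1 ∈ g p.2 := h1 p (by simp)
    have hsingle : (g p.2).length = 1 → g p.2 = [p.1] := by
      intro hl
      rcases List.length_eq_one_iff.mp hl with ⟨a, ha⟩
      rw [ha] at hp1 ⊢
      simp at hp1
      rw [hp1]
    simp only [List.map_cons, List.foldl_cons, List.filter_cons]
    by_cases hc : s.contains p.2 = true
    · have hadd : PySem.Set.add s p.2 = s := by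
        simp only [PySem.Set.add, hc, if_pos]
      have hlen : (g p.2).length ≠ 1 := h3 p (by simp) hc
      have hQ : ((g p.2).length == 1) = false := by simp [hlen]
      rw [hadd, hQ]
      simp only [Bool.false_eq_true, if_neg, not_false_eq_true]
      exact ih s (fun r hr => h1 r (by simp [hr])) (by simpa using h2.of_cons)
        (fun r hr hrc => h3 r (by simp [hr]) hrc)
    · have hadd : PySem.Set.add s p.2 = s ++ [p.2] := by
        simp only [PySem.Set.add]
        rw [if_neg hc]
      have hfst : p.1 ∉ t.map (fun r => r.1) := (List.nodup_cons.mp (by simpa using h2)).1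
      have h3' : ∀ r ∈ t, (s ++ [p.2]).contains r.2 = true → (g r.2).length ≠ 1 := by
        intro r hr hrc hl
        have hmem : r.2 ∈ s ∨ r.2 = p.2 := by
          have := hrc
          simp [PySem.Set.contains] at this
          rcases this with h | h
          · left; exact h
          · right; simpa using h
        rcases hmem with hin | heq
        · exact h3 r (by simp [hr]) (by simp [PySem.Set.contains, hin]) hl
        · have hr1 : r.1 ∈ g r.2 := h1 r (by simp [hr])
          rw [heq] at hr1 hl
          have hgp : g p.2 = [p.1] := hsingle hl
          rw [hgp] at hr1
          simp at hr1
          exact hfst (hr1 ▸ List.mem_map.mpr ⟨r, hr, rfl⟩)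
      have hrec := ih (s ++ [p.2]) (fun r hr => h1 r (by simp [hr]))
        (by simpa using h2.of_cons) h3'
      rw [hadd, hrec, List.filter_append]
      by_cases hQ : ((g p.2).length == 1) = true
      · have hgp : g p.2 = [p.1] := hsingle (by simpa using hQ)
        simp only [hQ, if_pos, List.filter_cons, List.map_append, List.map_cons]
        simp [hgp]
      · simp only [Bool.not_eq_true] at hQ
        simp [hQ]

-- the grouping dict of a pair list: keys and lookups
theorem pv_groups_getD (E : List (Int × List Int)) (k : List Int) :
    (E.foldl (fun (d : PySem.Dict (List Int) (List Int)) p => d.modify p.2 [] (fun v => v ++ [p.1]))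
        PySem.Dict.empty).getD k []
      = (E.filter (fun p => p.2 == k)).map (fun p => p.1) := by
  have hm : E.foldl (fun (d : PySem.Dict (List Int) (List Int)) p =>
        d.modify p.2 [] (fun v => v ++ [p.1])) PySem.Dict.empty
      = (E.map (fun p => (p.2, p.1))).foldl
        (fun (d : PySem.Dict (List Int) (List Int)) p =>
          d.modify p.1 [] (fun v => v ++ [p.2])) PySem.Dict.empty := by
    rw [List.foldl_map]
  rw [hm, PySem.Dict.getD_foldl_modify_append]
  simp [List.filter_map, Function.comp_def]

theorem pv_groups_keys (E : List (Int × List Int)) :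
    (E.foldl (fun (d : PySem.Dict (List Int) (List Int)) p => d.modify p.2 [] (fun v => v ++ [p.1]))
        PySem.Dict.empty).keys = PySem.Set.ofList (E.map (fun p => p.2)) := by
  rw [PySem.Dict.keys_foldl_modify_key E (fun p => p.2) [] (fun _ p => fun v => v ++ [p.1])]
  rw [PySem.Dict.keys_empty]
  rfl

theorem pv_groups_nodup (E : List (Int × List Int)) :
    (E.foldl (fun (d : PySem.Dict (List Int) (List Int)) p => d.modify p.2 [] (fun v => v ++ [p.1]))
        PySem.Dict.empty).keys.Nodup := by
  exact PySem.Dict.nodup_keys_foldl_modify_key E (fun p => p.2) [] (fun _ p => fun v => v ++ [p.1])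
    PySem.Dict.empty (by simp [PySem.Dict.keys_empty])

theorem pv_groups_items (E : List (Int × List Int)) :
    (E.foldl (fun (d : PySem.Dict (List Int) (List Int)) p => d.modify p.2 [] (fun v => v ++ [p.1]))
        PySem.Dict.empty).items
      = (PySem.Set.ofList (E.map (fun p => p.2))).map
          (fun k => (k, (E.filter (fun p => p.2 == k)).map (fun p => p.1))) := by
  rw [PySem.Dict.items_eq_map_keys _ (pv_groups_nodup E) [], pv_groups_keys E]
  exact List.map_congr_left (fun k _ => by rw [pv_groups_getD])

-- the common normal form both ports are reduced to
def pvNF (L : List (List Int)) : List Int × (List (List Int × List Int)) :=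
  (((PySem.Set.ofList ((pvE L).map (fun p => p.2))).filter
      (fun k => (pvIdx L k).length == 1)).map (fun k => PySem.List.pyGetD (pvIdx L k) 0 0),
   ((PySem.Set.ofList ((pvE L).map (fun p => p.2))).filter
      (fun k => !((pvIdx L k).length == 1))).map (fun k => (k, pvIdx L k)))

theorem pv_ofList_filter' {α : Type} [BEq α] [LawfulBEq α] (q : α → Bool) (xs : List α) :
    PySem.Set.ofList (xs.filter q) = (PySem.Set.ofList xs).filter q := by
  have h := pv_ofList_filter q xs []
  simp only [List.filter_nil] at h
  exact h.symm

theorem pv_A_eq (L : List (List Int)) : find_non_similar_lists L = pvNF L := by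
  unfold find_non_similar_lists
  rw [PySem.List.foldl_congr_mem (PySem.List.enumerate L 0) _
    (fun (s : List Int × PySem.Dict (List Int) (List Int)) (p : Int × List Int) =>
      ((if ((pvIdx L p.2).length == 1) then s.1 ++ [p.1] else s.1),
       (if !((pvIdx L p.2).length == 1) then
          (if !(s.2.contains p.2) then s.2.insert p.2 [p.1]
           else s.2.modify p.2 [] (fun v => v ++ [p.1]))
        else s.2))) _
    (by
      intro s p hp
      have hsim := pv_similar_eq L (show p ∈ pvE L from hp)
      unfold pvE at hsim
      dsimp only
      rw [hsim]
      cases h : ((pvIdx L p.2).length == 1) <;>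
        by_cases hc : s.2.contains p.2 = true <;> simp_all)]
  rw [PySem.List.foldl_prod_mk
    (f := fun (acc : List Int) (p : Int × List Int) =>
      if ((pvIdx L p.2).length == 1) then acc ++ [p.1] else acc)
    (g := fun (d : PySem.Dict (List Int) (List Int)) (p : Int × List Int) =>
      if !((pvIdx L p.2).length == 1) then
        (if !(d.contains p.2) then d.insert p.2 [p.1]
         else d.modify p.2 [] (fun v => v ++ [p.1]))
      else d)]
  rw [PySem.List.foldl_append_if (fun (p : Int × List Int) => ((pvIdx L p.2).length == 1))
    (fun p => p.1)]
  rw [PySem.List.foldl_if_eq_foldl_filter (fun (p : Int × List Int) => !((pvIdx L p.2).length == 1))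
    (fun (d : PySem.Dict (List Int) (List Int)) (p : Int × List Int) =>
      (if !(d.contains p.2) then d.insert p.2 [p.1]
       else d.modify p.2 [] (fun v => v ++ [p.1])))]
  rw [PySem.List.foldl_congr_mem _ _
    (fun (d : PySem.Dict (List Int) (List Int)) (p : Int × List Int) =>
      d.modify p.2 [] (fun v => v ++ [p.1])) _
    (by
      intro d p _
      dsimp only
      by_cases hc : d.contains p.2 = true
      · simp [hc]
      · simp only [Bool.not_eq_true] at hc
        simp [hc, PySem.Dict.modify, PySem.Dict.getD_of_not_contains _ _ hc])]
  dsimp only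
  rw [pv_groups_items]
  unfold pvNF
  refine Prod.ext ?_ ?_
  · -- first component via the master lemma
    have hmaster := pv_master (pvIdx L) (pvE L) []
      (fun p hp => pv_mem_idx L hp) (pv_nodup_fst L)
      (fun p _ hc => by simp [PySem.Set.contains] at hc)
    simp only [List.filter_nil, List.map_nil, List.nil_append] at hmaster
    have hof : PySem.Set.ofList ((pvE L).map (fun p => p.2))
        = ((pvE L).map (fun p => p.2)).foldl PySem.Set.add [] := rfl
    dsimp only
    rw [hof, hmaster]
    unfold pvE
    simp
  · -- second component: keys then values
    dsimp only
    have hkeys : ((PySem.List.enumerate L 0).filter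
          (fun p => !((pvIdx L p.2).length == 1))).map (fun p => p.2)
        = ((pvE L).map (fun p => p.2)).filter (fun k => !((pvIdx L k).length == 1)) := by
      unfold pvE
      rw [List.filter_map]
      rfl
    rw [hkeys, pv_ofList_filter']
    refine List.map_congr_left ?_
    intro k hk
    have hq : (!((pvIdx L k).length == 1)) = true := (List.mem_filter.mp hk).2
    have hff : ((PySem.List.enumerate L 0).filter
          (fun p => !((pvIdx L p.2).length == 1))).filter (fun p => p.2 == k)
        = (PySem.List.enumerate L 0).filter (fun p => p.2 == k) := by
      rw [List.filter_filter]
      refine List.filter_congr ?_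
      intro p _
      cases h2 : (p.2 == k)
      · simp
      · have : p.2 = k := by simpa using h2
        rw [this]
        simp [hq]
    rw [hff]
    rfl

theorem pv_B_eq (L : List (List Int)) : find_non_similar_lists_alt L = pvNF L := by
  unfold find_non_similar_lists_alt
  dsimp only
  rw [pv_groups_items (PySem.List.enumerate L 0)]
  rw [PySem.List.foldl_congr_mem _ _
    (fun (s : List Int × PySem.Dict (List Int) (List Int)) (kv : List Int × List Int) =>
      ((if kv.2.length == 1 then s.1 ++ [PySem.List.pyGetD kv.2 0 0] else s.1),
       (if !(kv.2.length == 1) then s.2.insert kv.1 kv.2 else s.2))) _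
    (by intro s kv _; dsimp only; cases h : (kv.2.length == 1) <;> simp_all)]
  rw [PySem.List.foldl_prod_mk
    (f := fun (acc : List Int) (kv : List Int × List Int) =>
      if kv.2.length == 1 then acc ++ [PySem.List.pyGetD kv.2 0 0] else acc)
    (g := fun (d : PySem.Dict (List Int) (List Int)) (kv : List Int × List Int) =>
      if !(kv.2.length == 1) then d.insert kv.1 kv.2 else d)]
  rw [PySem.List.foldl_append_if (fun (kv : List Int × List Int) => kv.2.length == 1)
    (fun kv => PySem.List.pyGetD kv.2 0 0)]
  rw [PySem.List.foldl_if_eq_foldl_filter (fun (kv : List Int × List Int) => !(kv.2.length == 1))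
    (fun (d : PySem.Dict (List Int) (List Int)) (kv : List Int × List Int) =>
      d.insert kv.1 kv.2)]
  dsimp only
  -- the filtered item lists, rewritten to live over the key set
  have hfil1 : ∀ (q : List Int → Bool),
      ((PySem.Set.ofList ((PySem.List.enumerate L 0).map (fun p => p.2))).map
          (fun k => (k, ((PySem.List.enumerate L 0).filter (fun p => p.2 == k)).map (fun p => p.1)))).filter
        (fun kv => q kv.2)
      = ((PySem.Set.ofList ((PySem.List.enumerate L 0).map (fun p => p.2))).filter
          (fun k => q (pvIdx L k))).map
          (fun k => (k, ((PySem.List.enumerate L 0).filter (fun p => p.2 == k)).map (fun p => p.1))) := by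
    intro q
    rw [List.filter_map]
    rfl
  refine Prod.ext ?_ ?_
  · -- first component
    rw [hfil1 (fun v => v.length == 1)]
    rw [List.map_map]
    simp only [pvNF, pvE, pvIdx]
    rfl
  · -- second component
    dsimp only
    rw [PySem.Dict.items_foldl_insert_fresh _ (fun (kv : List Int × List Int) => kv.1)
      (fun (kv : List Int × List Int) => kv.2) PySem.Dict.empty
      (fun a _ => PySem.Dict.contains_empty a.1)
      (by
        rw [hfil1 (fun v => !(v.length == 1)), List.map_map]
        have : ((fun (kv : List Int × List Int) => kv.1) ∘
            (fun k => (k, ((PySem.List.enumerate L 0).filter (fun p => p.2 == k)).map (fun p => p.1))))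
            = id := rfl
        rw [this, List.map_id]
        exact (PySem.Set.nodup_ofList _).filter _)]
    rw [hfil1 (fun v => !(v.length == 1))]
    simp only [PySem.Dict.empty, List.nil_append, List.map_map]
    simp only [pvNF, pvE, pvIdx]
    rfl

-- ===== VERDICT (by name: the statement is the Claim_ definition above) =====
theorem find_non_similar_lists_spec : Claim_equal_find_non_similar_lists := by
  intro L _
  unfold Spec_find_non_similar_lists
  rw [pv_A_eq L, pv_B_eq L]
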